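-- pv_equiv track=rewrite | github.com/Aryaman-Angurana/python_library | calendar/basic_functions.py | number_of_days_at_start
-- ===== SOURCE A (Python) =====
-- def is_leap_year(a):
--     if a % 4 == 0 and a % 100 != 0:
--         return True
--     elif a % 400 == 0:
--         return True
--     else:
--         return False
--
-- def number_of_days_at_start(year):
--     days = 0
--     for i in range(1, year + 1):
--         if is_leap_year(i):
--             days += 366
--         else:
--             days += 365
--     return days
-- ===== SOURCE B (Python) =====
-- def number_of_days_at_start(year):
--     if year <= 0:
--         return 0
--     return 365 * year + year // 4 - year // 100 + year // 400
-- ===== Notes on version B (the rewrite author's own statement) =====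
-- stated objective: faster
-- what changed: Replaced the per-year summing loop with an O(1) closed-form expression counting the leap days via three floor divisions (zero for non-positive years).
import Mathlib
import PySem

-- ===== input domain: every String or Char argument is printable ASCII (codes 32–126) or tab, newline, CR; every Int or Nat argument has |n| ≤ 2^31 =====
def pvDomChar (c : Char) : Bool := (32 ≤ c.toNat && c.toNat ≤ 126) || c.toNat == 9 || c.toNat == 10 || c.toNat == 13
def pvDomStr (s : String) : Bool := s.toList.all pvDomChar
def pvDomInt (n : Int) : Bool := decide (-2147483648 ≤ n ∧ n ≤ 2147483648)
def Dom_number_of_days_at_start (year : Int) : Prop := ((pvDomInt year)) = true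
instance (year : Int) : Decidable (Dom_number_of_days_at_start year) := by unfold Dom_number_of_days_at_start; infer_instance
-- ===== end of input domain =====

-- B replaces A's per-year summing loop with the closed-form leap-day count (faster: O(1) vs O(year)).

-- ===== PORT A =====
def is_leap_year (a : Int) : Bool :=
  if PySem.Int.mod a 4 == 0 && !(PySem.Int.mod a 100 == 0) then true
  else if PySem.Int.mod a 400 == 0 then true
  else false

def number_of_days_at_start (year : Int) : Int :=
  (PySem.List.pyRange 1 (year + 1) 1).foldl
    (fun days i => if is_leap_year i then days + 366 else days + 365) 0

-- ===== PORT B =====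
def number_of_days_at_start_alt (year : Int) : Int :=
  if year ≤ 0 then 0
  else 365 * year + PySem.Int.floordiv year 4 - PySem.Int.floordiv year 100
        + PySem.Int.floordiv year 400

-- ===== PRECONDITION & SPEC =====
def Spec_number_of_days_at_start (year : Int) (out : Int) : Prop := out = number_of_days_at_start_alt year
instance (year : Int) (out : Int) : Decidable (Spec_number_of_days_at_start year out) := by unfold Spec_number_of_days_at_start; infer_instance

-- ===== CLAIM (what is proved, stated in full; the proofs are below) =====
def Claim_equal_number_of_days_at_start : Prop := ∀ (year : Int), Dom_number_of_days_at_start year → Spec_number_of_days_at_start year (number_of_days_at_start year)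

-- ===== LEMMAS AND PROOFS =====

theorem closed_form_nat (n : Nat) :
    number_of_days_at_start (n : Int) =
      365 * (n : Int) + (n : Int) / 4 - (n : Int) / 100 + (n : Int) / 400 := by
  induction n with
  | zero =>
      norm_num [number_of_days_at_start, PySem.List.pyRange_one_eq_nil (by omega : (0:Int)+1 ≤ 1)]
  | succ k ih =>
      have h : ((k + 1 : Nat) : Int) + 1 = ((k : Int) + 1) + 1 := by push_cast; ring
      unfold number_of_days_at_start at ih ⊢
      rw [h, PySem.List.pyRange_one_succ_right (by omega : (1:Int) ≤ (k:Int) + 1),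
          List.foldl_append, ih]
      simp only [List.foldl]
      have h4 : PySem.Int.mod ((k:Int)+1) 4 = ((k:Int)+1) % 4 := PySem.Int.mod_eq_emod_of_pos (by norm_num)
      have h100 : PySem.Int.mod ((k:Int)+1) 100 = ((k:Int)+1) % 100 := PySem.Int.mod_eq_emod_of_pos (by norm_num)
      have h400 : PySem.Int.mod ((k:Int)+1) 400 = ((k:Int)+1) % 400 := PySem.Int.mod_eq_emod_of_pos (by norm_num)
      simp only [is_leap_year, h4, h100, h400]
      push_cast
      by_cases l4 : ((k:Int)+1) % 4 = 0 <;> by_cases l100 : ((k:Int)+1) % 100 = 0 <;>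
        by_cases l400 : ((k:Int)+1) % 400 = 0 <;>
        simp [l4, l100, l400] <;> omega

-- ===== VERDICT (by name: the statement is the Claim_ definition above) =====
theorem number_of_days_at_start_spec : Claim_equal_number_of_days_at_start := by
  intro year _
  unfold Spec_number_of_days_at_start number_of_days_at_start_alt
  by_cases hy : year ≤ 0
  · simp [hy, number_of_days_at_start,
      PySem.List.pyRange_one_eq_nil (by omega : year + 1 ≤ 1)]
  · rw [not_le] at hy
    obtain ⟨n, rfl⟩ : ∃ n : Nat, year = (n : Int) := ⟨year.toNat, by omega⟩
    rw [closed_form_nat n]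
    simp [not_le.mpr hy, PySem.Int.floordiv_eq_ediv_of_pos (a := (n:Int)) (by norm_num : (0:Int) < 4),
      PySem.Int.floordiv_eq_ediv_of_pos (a := (n:Int)) (by norm_num : (0:Int) < 100),
      PySem.Int.floordiv_eq_ediv_of_pos (a := (n:Int)) (by norm_num : (0:Int) < 400)]
    omega
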